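-- pv_equiv track=rewrite | github.com/SmetanskaK/hw | task_24.py | group_by_surname
-- ===== SOURCE A (Python) =====
-- def group_by_surname(list_of_enrolled):
--     amount_of_students_a_i = 0
--     amount_of_students_j_p = 0
--     amount_of_students_q_t = 0
--     amount_of_students_u_z = 0
--     for student in list_of_enrolled:
--         name_and_surname = student.split(" ")
--         first_letter = str(name_and_surname[1])[0]
--         number_of_letter = ord(first_letter)
--         if ord("A") <= number_of_letter <= ord("I"):
--             amount_of_students_a_i += 1
--         elif ord("J") <= number_of_letter <= ord("P"):
--             amount_of_students_j_p += 1
--         elif ord("Q") <= number_of_letter <= ord("T"):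
--             amount_of_students_q_t += 1
--         else:
--             amount_of_students_u_z += 1
--     return amount_of_students_a_i, amount_of_students_j_p, \
--            amount_of_students_q_t, amount_of_students_u_z
-- ===== SOURCE B (Python) =====
-- def group_by_surname(list_of_enrolled):
--     counts = {}
--     for student in list_of_enrolled:
--         c = student.split(" ")[1][0]
--         counts[c] = counts.get(c, 0) + 1
--     a_i = sum(counts.get(chr(code), 0) for code in range(ord("A"), ord("I") + 1))
--     j_p = sum(counts.get(chr(code), 0) for code in range(ord("J"), ord("P") + 1))
--     q_t = sum(counts.get(chr(code), 0) for code in range(ord("Q"), ord("T") + 1))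
--     u_z = len(list_of_enrolled) - a_i - j_p - q_t
--     return a_i, j_p, q_t, u_z
-- ===== Notes on version B (the rewrite author's own statement) =====
-- stated objective: alternative
-- what changed: Replaces the four-accumulator if/elif classification loop by a frequency table of surname initials built in one pass, with the A-I/J-P/Q-T totals obtained as range sums over the table and the U-Z bucket computed as the remainder from the list length.
import Mathlib
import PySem

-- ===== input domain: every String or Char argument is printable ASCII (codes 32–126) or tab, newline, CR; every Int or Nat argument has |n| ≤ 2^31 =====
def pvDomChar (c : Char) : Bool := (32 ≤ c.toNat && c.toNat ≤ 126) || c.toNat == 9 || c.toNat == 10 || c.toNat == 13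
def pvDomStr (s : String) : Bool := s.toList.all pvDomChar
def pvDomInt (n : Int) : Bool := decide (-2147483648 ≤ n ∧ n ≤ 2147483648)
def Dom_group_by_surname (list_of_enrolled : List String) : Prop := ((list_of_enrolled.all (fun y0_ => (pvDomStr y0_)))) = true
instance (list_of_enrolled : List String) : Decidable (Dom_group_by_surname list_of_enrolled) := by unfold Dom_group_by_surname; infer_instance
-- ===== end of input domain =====

-- B builds a frequency table of surname initials and takes range sums over it (U-Z as the
-- remainder from the list length) instead of A's four-accumulator if/elif loop; same cost ("alternative").

-- student.split(" ") — an expression both Pythons evaluate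
def pvParts (s : String) : List (List Char) := PySem.Chars.splitOn s.toList [' ']
-- student.split(" ")[1][0]; under Pre_ both indexings succeed, so the defaults are never used
def pvInitial (s : String) : Char :=
  (PySem.List.pyGet? ((PySem.List.pyGet? (pvParts s) 1).getD []) 0).getD ' '

-- ===== PORT A =====
def group_by_surname (list_of_enrolled : List String) : Int × Int × Int × Int :=
  list_of_enrolled.foldl
    (fun acc student =>
      let number_of_letter : Int := ((pvInitial student).toNat : Int)
      if 65 ≤ number_of_letter ∧ number_of_letter ≤ 73 then        -- ord "A" .. ord "I"
        (acc.1 + 1, acc.2.1, acc.2.2.1, acc.2.2.2)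
      else if 74 ≤ number_of_letter ∧ number_of_letter ≤ 80 then   -- ord "J" .. ord "P"
        (acc.1, acc.2.1 + 1, acc.2.2.1, acc.2.2.2)
      else if 81 ≤ number_of_letter ∧ number_of_letter ≤ 84 then   -- ord "Q" .. ord "T"
        (acc.1, acc.2.1, acc.2.2.1 + 1, acc.2.2.2)
      else
        (acc.1, acc.2.1, acc.2.2.1, acc.2.2.2 + 1))
    (0, 0, 0, 0)

-- ===== PORT B =====
def group_by_surname_alt (list_of_enrolled : List String) : Int × Int × Int × Int :=
  let counts : PySem.Dict Char Int :=
    list_of_enrolled.foldl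
      (fun d student => d.insert (pvInitial student) (d.getD (pvInitial student) 0 + 1))
      PySem.Dict.empty
  let a_i : Int := ((PySem.List.pyRange 65 74 1).map (fun code => counts.getD (Char.ofNat code.toNat) 0)).sum
  let j_p : Int := ((PySem.List.pyRange 74 81 1).map (fun code => counts.getD (Char.ofNat code.toNat) 0)).sum
  let q_t : Int := ((PySem.List.pyRange 81 85 1).map (fun code => counts.getD (Char.ofNat code.toNat) 0)).sum
  let u_z : Int := (list_of_enrolled.length : Int) - a_i - j_p - q_t
  (a_i, j_p, q_t, u_z)

-- ===== PRECONDITION & SPEC =====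
-- Excludes exactly the inputs on which Python A raises IndexError: an entry whose
-- split(" ") has fewer than two fields, or whose second field is the empty string.
def Pre_group_by_surname (list_of_enrolled : List String) : Prop :=
  ∀ s ∈ list_of_enrolled, 2 ≤ (pvParts s).length ∧ (pvParts s).getD 1 [] ≠ []
instance (list_of_enrolled : List String) : Decidable (Pre_group_by_surname list_of_enrolled) := by unfold Pre_group_by_surname; infer_instance
def pvWitness_group_by_surname : List String := ["Ann Bell", "Tom sawyer", "Z q"]

def Spec_group_by_surname (list_of_enrolled : List String) (out : Int × Int × Int × Int) : Prop := out = group_by_surname_alt list_of_enrolled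
instance (list_of_enrolled : List String) (out : Int × Int × Int × Int) : Decidable (Spec_group_by_surname list_of_enrolled out) := by unfold Spec_group_by_surname; infer_instance

-- ===== CLAIM (what is proved, stated in full; the proofs are below) =====
def Claim_equal_group_by_surname : Prop := ∀ (list_of_enrolled : List String), Dom_group_by_surname list_of_enrolled → Pre_group_by_surname list_of_enrolled → Spec_group_by_surname list_of_enrolled (group_by_surname list_of_enrolled)

-- ===== LEMMAS AND PROOFS =====

-- the three letter-range tests of A's branches, as Bool predicates on the initial
def pvP1 (c : Char) : Bool := decide (65 ≤ (c.toNat : Int) ∧ (c.toNat : Int) ≤ 73)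
def pvP2 (c : Char) : Bool := decide (74 ≤ (c.toNat : Int) ∧ (c.toNat : Int) ≤ 80)
def pvP3 (c : Char) : Bool := decide (81 ≤ (c.toNat : Int) ∧ (c.toNat : Int) ≤ 84)

theorem pvCharEq (c k : Char) : c = k ↔ c.toNat = k.toNat := by
  constructor
  · rintro rfl; rfl
  · intro h; exact Char.ext (UInt32.toNat_inj.mp h)

-- A's fold adds the four partition counts to its accumulator
theorem pvFoldA (l : List String) (a b c d : Int) :
    l.foldl
      (fun acc student =>
        let number_of_letter : Int := ((pvInitial student).toNat : Int)
        if 65 ≤ number_of_letter ∧ number_of_letter ≤ 73 then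
          (acc.1 + 1, acc.2.1, acc.2.2.1, acc.2.2.2)
        else if 74 ≤ number_of_letter ∧ number_of_letter ≤ 80 then
          (acc.1, acc.2.1 + 1, acc.2.2.1, acc.2.2.2)
        else if 81 ≤ number_of_letter ∧ number_of_letter ≤ 84 then
          (acc.1, acc.2.1, acc.2.2.1 + 1, acc.2.2.2)
        else
          (acc.1, acc.2.1, acc.2.2.1, acc.2.2.2 + 1))
      (a, b, c, d)
    = (a + ((l.map pvInitial).countP pvP1 : Int),
       b + ((l.map pvInitial).countP pvP2 : Int),
       c + ((l.map pvInitial).countP pvP3 : Int),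
       d + ((l.map pvInitial).countP (fun x => !(pvP1 x || pvP2 x || pvP3 x)) : Int)) := by
  induction l generalizing a b c d with
  | nil => simp
  | cons s t ih =>
    simp only [List.foldl_cons, List.map_cons, List.countP_cons]
    by_cases h1 : 65 ≤ ((pvInitial s).toNat : Int) ∧ ((pvInitial s).toNat : Int) ≤ 73
    · have e1 : pvP1 (pvInitial s) = true := decide_eq_true h1
      have e2 : pvP2 (pvInitial s) = false := decide_eq_false (by omega)
      have e3 : pvP3 (pvInitial s) = false := decide_eq_false (by omega)
      rw [if_pos h1, ih]
      simp only [e1, e2, e3, Bool.or_false, Bool.not_true, if_true, if_false,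
        Bool.false_eq_true, Prod.mk.injEq]
      refine ⟨?_, ?_, ?_, ?_⟩ <;> push_cast <;> ring
    · by_cases h2 : 74 ≤ ((pvInitial s).toNat : Int) ∧ ((pvInitial s).toNat : Int) ≤ 80
      · have e1 : pvP1 (pvInitial s) = false := decide_eq_false h1
        have e2 : pvP2 (pvInitial s) = true := decide_eq_true h2
        have e3 : pvP3 (pvInitial s) = false := decide_eq_false (by omega)
        rw [if_neg h1, if_pos h2, ih]
        simp only [e1, e2, e3, Bool.false_or, Bool.or_false, Bool.not_true, if_true, if_false,
          Bool.false_eq_true, Prod.mk.injEq]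
        refine ⟨?_, ?_, ?_, ?_⟩ <;> push_cast <;> ring
      · by_cases h3 : 81 ≤ ((pvInitial s).toNat : Int) ∧ ((pvInitial s).toNat : Int) ≤ 84
        · have e1 : pvP1 (pvInitial s) = false := decide_eq_false h1
          have e2 : pvP2 (pvInitial s) = false := decide_eq_false h2
          have e3 : pvP3 (pvInitial s) = true := decide_eq_true h3
          rw [if_neg h1, if_neg h2, if_pos h3, ih]
          simp only [e1, e2, e3, Bool.false_or, Bool.not_true, if_true, if_false,
            Bool.false_eq_true, Prod.mk.injEq]
          refine ⟨?_, ?_, ?_, ?_⟩ <;> push_cast <;> ring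
        · have e1 : pvP1 (pvInitial s) = false := decide_eq_false h1
          have e2 : pvP2 (pvInitial s) = false := decide_eq_false h2
          have e3 : pvP3 (pvInitial s) = false := decide_eq_false h3
          rw [if_neg h1, if_neg h2, if_neg h3, ih]
          simp only [e1, e2, e3, Bool.false_or, Bool.not_false, if_true, if_false,
            Bool.false_eq_true, Prod.mk.injEq]
          refine ⟨?_, ?_, ?_, ?_⟩ <;> push_cast <;> ring

theorem pvIndicatorZero (c : Char) (t : List Char) (hct : c ∉ t) :
    (t.map (fun k => if c = k then (1:Int) else 0)).sum = 0 := by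
  apply List.sum_eq_zero
  intro x hx
  rcases List.mem_map.mp hx with ⟨k, hk, rfl⟩
  have h : ¬ c = k := fun h => hct (h ▸ hk)
  simp [h]

theorem pvIndicator (ks : List Char) (hnd : ks.Nodup) (c : Char) :
    (ks.map (fun k => if c = k then (1:Int) else 0)).sum = if c ∈ ks then 1 else 0 := by
  induction ks with
  | nil => simp
  | cons k t ih =>
    rcases List.nodup_cons.mp hnd with ⟨hk, ht⟩
    by_cases h : c = k
    · subst h; simp [pvIndicatorZero c t hk]
    · simp [List.mem_cons, h, ih ht]

-- sum of per-key counts over a duplicate-free key list = count of members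
theorem pvSumCounts (ks : List Char) (hnd : ks.Nodup) (inits : List Char) :
    (ks.map (fun k => (inits.count k : Int))).sum
      = ((inits.countP (fun c => decide (c ∈ ks))) : Int) := by
  induction inits with
  | nil => simp
  | cons c t ih =>
    simp only [List.count_cons, List.countP_cons]
    have e : (fun k => (((t.count k + if c == k then 1 else 0 : Nat)) : Int))
        = fun k => ((t.count k : Int) + if c = k then (1:Int) else 0) := by
      funext k; by_cases h : c = k <;> simp [h]
    rw [e, PySem.List.sum_map_add_int, ih, pvIndicator ks hnd c]
    by_cases h : c ∈ ks <;> simp [h]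

-- B's counter lookup is a plain count over the initials
theorem pvDictCount (l : List String) (f : String → Char) (k : Char) :
    (l.foldl (fun d s => d.insert (f s) (d.getD (f s) 0 + 1)) (PySem.Dict.empty : PySem.Dict Char Int)).getD k 0
      = ((l.map f).count k : Int) := by
  rw [← List.foldl_map (f := f) (g := fun (d : PySem.Dict Char Int) (c : Char) => d.insert c (d.getD c 0 + 1))
      (l := l) (init := PySem.Dict.empty),
    PySem.Dict.getD_foldl_insert_add_one]
  simp

theorem pvMem1 (c : Char) : decide (c ∈ (['A','B','C','D','E','F','G','H','I'] : List Char)) = pvP1 c := by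
  unfold pvP1
  rw [decide_eq_decide]
  simp only [List.mem_cons, List.not_mem_nil, or_false, pvCharEq,
    show 'A'.toNat = 65 from rfl, show 'B'.toNat = 66 from rfl, show 'C'.toNat = 67 from rfl,
    show 'D'.toNat = 68 from rfl, show 'E'.toNat = 69 from rfl, show 'F'.toNat = 70 from rfl,
    show 'G'.toNat = 71 from rfl, show 'H'.toNat = 72 from rfl, show 'I'.toNat = 73 from rfl]
  omega

theorem pvMem2 (c : Char) : decide (c ∈ (['J','K','L','M','N','O','P'] : List Char)) = pvP2 c := by
  unfold pvP2
  rw [decide_eq_decide]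
  simp only [List.mem_cons, List.not_mem_nil, or_false, pvCharEq,
    show 'J'.toNat = 74 from rfl, show 'K'.toNat = 75 from rfl, show 'L'.toNat = 76 from rfl,
    show 'M'.toNat = 77 from rfl, show 'N'.toNat = 78 from rfl, show 'O'.toNat = 79 from rfl,
    show 'P'.toNat = 80 from rfl]
  omega

theorem pvMem3 (c : Char) : decide (c ∈ (['Q','R','S','T'] : List Char)) = pvP3 c := by
  unfold pvP3
  rw [decide_eq_decide]
  simp only [List.mem_cons, List.not_mem_nil, or_false, pvCharEq,
    show 'Q'.toNat = 81 from rfl, show 'R'.toNat = 82 from rfl, show 'S'.toNat = 83 from rfl,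
    show 'T'.toNat = 84 from rfl]
  omega

theorem pvCountP1 (inits : List Char) :
    inits.countP (fun c => decide (c ∈ (['A','B','C','D','E','F','G','H','I'] : List Char))) = inits.countP pvP1 :=
  List.countP_congr (fun c _ => by rw [pvMem1 c])
theorem pvCountP2 (inits : List Char) :
    inits.countP (fun c => decide (c ∈ (['J','K','L','M','N','O','P'] : List Char))) = inits.countP pvP2 :=
  List.countP_congr (fun c _ => by rw [pvMem2 c])
theorem pvCountP3 (inits : List Char) :
    inits.countP (fun c => decide (c ∈ (['Q','R','S','T'] : List Char))) = inits.countP pvP3 :=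
  List.countP_congr (fun c _ => by rw [pvMem3 c])

-- the four branch predicates partition every list of initials
theorem pvPartition (inits : List Char) :
    inits.countP pvP1 + inits.countP pvP2 + inits.countP pvP3
      + inits.countP (fun x => !(pvP1 x || pvP2 x || pvP3 x)) = inits.length := by
  induction inits with
  | nil => simp
  | cons c t ih =>
    simp only [List.countP_cons, List.length_cons, pvP1, pvP2, pvP3, decide_eq_true_eq,
      Bool.not_eq_true', Bool.or_eq_false_iff, decide_eq_false_iff_not] at ih ⊢
    split_ifs <;> omega

-- the three pyRange sums, written over the literal key lists (definitional)
theorem pvRange1 (inits : List Char) :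
    ((PySem.List.pyRange 65 74 1).map (fun code => ((inits.count (Char.ofNat code.toNat)) : Int))).sum
      = ((['A','B','C','D','E','F','G','H','I'] : List Char).map (fun k => (inits.count k : Int))).sum := rfl
theorem pvRange2 (inits : List Char) :
    ((PySem.List.pyRange 74 81 1).map (fun code => ((inits.count (Char.ofNat code.toNat)) : Int))).sum
      = ((['J','K','L','M','N','O','P'] : List Char).map (fun k => (inits.count k : Int))).sum := rfl
theorem pvRange3 (inits : List Char) :
    ((PySem.List.pyRange 81 85 1).map (fun code => ((inits.count (Char.ofNat code.toNat)) : Int))).sum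
      = ((['Q','R','S','T'] : List Char).map (fun k => (inits.count k : Int))).sum := rfl

-- B's result, characterised by the same partition counts
theorem pvAltChar (l : List String) :
    group_by_surname_alt l =
      (((l.map pvInitial).countP pvP1 : Int),
       ((l.map pvInitial).countP pvP2 : Int),
       ((l.map pvInitial).countP pvP3 : Int),
       (l.length : Int) - ((l.map pvInitial).countP pvP1 : Int)
         - ((l.map pvInitial).countP pvP2 : Int) - ((l.map pvInitial).countP pvP3 : Int)) := by
  unfold group_by_surname_alt
  simp only [pvRange1, pvRange2, pvRange3, pvDictCount,
    pvSumCounts ['A','B','C','D','E','F','G','H','I'] (by decide),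
    pvSumCounts ['J','K','L','M','N','O','P'] (by decide),
    pvSumCounts ['Q','R','S','T'] (by decide),
    pvCountP1, pvCountP2, pvCountP3]

-- ===== VERDICT (by name: the statement is the Claim_ definition above) =====
theorem group_by_surname_spec : Claim_equal_group_by_surname := by
  intro l _ _
  unfold Spec_group_by_surname group_by_surname
  rw [pvAltChar, pvFoldA]
  have hp := pvPartition (l.map pvInitial)
  have hl : (l.map pvInitial).length = l.length := by simp
  simp only [Prod.mk.injEq]
  refine ⟨by omega, by omega, by omega, by omega⟩
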